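-- pv_equiv track=rewrite | github.com/k830206/students | case_generator.py | generate_complex_case
-- ===== SOURCE A (Python) =====
-- def generate_complex_case(N, W):
--     numbers = []
--     current_num = 0
--     for i in range(N):
--         numbers.append(str(current_num))
--
--         if i % 2 == 0:
--             current_num += 1
--         else:
--             current_num += W + 1
--
--     return numbers
-- ===== SOURCE B (Python) =====
-- def generate_complex_case(N, W):
--     # Closed form: the value at index i is i + (i // 2) * W (no running accumulator).
--     return [str(i + (i // 2) * W) for i in range(N)]
-- ===== Notes on version B (the rewrite author's own statement) =====
-- stated objective: simpler
-- what changed: Replaces the stateful loop with an even/odd branch and running accumulator by a single comprehension computing each element directly from its index via the closed form i + (i//2)*W.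
import Mathlib
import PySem

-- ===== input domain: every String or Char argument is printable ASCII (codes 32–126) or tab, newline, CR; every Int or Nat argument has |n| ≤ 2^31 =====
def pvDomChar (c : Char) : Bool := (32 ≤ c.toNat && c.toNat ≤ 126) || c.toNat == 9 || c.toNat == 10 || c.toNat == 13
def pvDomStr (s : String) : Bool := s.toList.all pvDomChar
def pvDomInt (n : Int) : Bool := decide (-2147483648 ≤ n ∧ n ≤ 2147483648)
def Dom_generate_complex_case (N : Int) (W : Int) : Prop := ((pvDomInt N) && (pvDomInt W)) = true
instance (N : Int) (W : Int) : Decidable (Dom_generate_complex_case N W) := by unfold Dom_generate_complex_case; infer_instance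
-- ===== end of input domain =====

-- B replaces A's running accumulator with the closed form i + (i//2)*W per index (simpler).


-- ===== PORT A =====
def generate_complex_case (N : Int) (W : Int) : List String :=
  (PySem.List.pyRange 0 N 1).foldl
    (fun (st : List String × Int) (i : Int) =>
      (st.1 ++ [PySem.Int.toStr st.2],
       if PySem.Int.mod i 2 = 0 then st.2 + 1 else st.2 + (W + 1)))
    ([], 0)
  |>.1

-- ===== PORT B =====
def generate_complex_case_alt (N : Int) (W : Int) : List String :=
  (PySem.List.pyRange 0 N 1).map
    (fun i => PySem.Int.toStr (i + PySem.Int.floordiv i 2 * W))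

-- ===== PRECONDITION & SPEC =====
def Spec_generate_complex_case (N : Int) (W : Int) (out : List String) : Prop := out = generate_complex_case_alt N W
instance (N : Int) (W : Int) (out : List String) : Decidable (Spec_generate_complex_case N W out) := by unfold Spec_generate_complex_case; infer_instance

-- ===== CLAIM (what is proved, stated in full; the proofs are below) =====
def Claim_equal_generate_complex_case : Prop := ∀ (N : Int) (W : Int), Dom_generate_complex_case N W → Spec_generate_complex_case N W (generate_complex_case N W)

-- ===== LEMMAS AND PROOFS =====

-- Loop invariant: after folding over range(0, n), the accumulator holds the mapped
-- prefix and the running counter equals the closed form n + (n//2)*W.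
theorem gcc_invariant (W : Int) (n : Nat) :
    (PySem.List.pyRange 0 n 1).foldl
      (fun (st : List String × Int) (i : Int) =>
        (st.1 ++ [PySem.Int.toStr st.2],
         if PySem.Int.mod i 2 = 0 then st.2 + 1 else st.2 + (W + 1)))
      ([], 0)
    = ((PySem.List.pyRange 0 n 1).map
         (fun i => PySem.Int.toStr (i + PySem.Int.floordiv i 2 * W)),
       (n : Int) + PySem.Int.floordiv n 2 * W) := by
  induction n with
  | zero => simp [PySem.List.pyRange_one_eq_nil, PySem.Int.floordiv]
  | succ m ih =>
    have hsplit : PySem.List.pyRange 0 ((m : Int) + 1) 1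
        = PySem.List.pyRange 0 m 1 ++ [(m : Int)] :=
      PySem.List.pyRange_one_succ_right (by omega)
    have hcast : ((m + 1 : Nat) : Int) = (m : Int) + 1 := by push_cast; ring
    rw [hcast, hsplit, List.foldl_append, List.map_append, ih]
    simp only [List.foldl_cons, List.foldl_nil, List.map_cons, List.map_nil]
    rw [Prod.mk.injEq]
    refine ⟨rfl, ?_⟩
    rw [PySem.Int.mod_eq_emod_of_pos (by omega),
      PySem.Int.floordiv_eq_ediv_of_pos (a := (m : Int)) (by omega),
      PySem.Int.floordiv_eq_ediv_of_pos (a := (m : Int) + 1) (by omega)]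
    rcases Int.even_or_odd (m : Int) with ⟨k, hk⟩ | ⟨k, hk⟩
    · have h0 : (m : Int) % 2 = 0 := by omega
      have h1 : (m : Int) / 2 = k := by omega
      have h2 : ((m : Int) + 1) / 2 = k := by omega
      simp [h0, h1, h2]
      ring
    · have h0 : ¬ ((m : Int) % 2 = 0) := by omega
      have h1 : (m : Int) / 2 = k := by omega
      have h2 : ((m : Int) + 1) / 2 = k + 1 := by omega
      simp [h0, h1, h2]
      ring

-- ===== VERDICT (by name: the statement is the Claim_ definition above) =====
theorem generate_complex_case_spec : Claim_equal_generate_complex_case := by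
  intro N W _
  unfold Spec_generate_complex_case generate_complex_case generate_complex_case_alt
  rcases le_or_gt N 0 with h | h
  · rw [PySem.List.pyRange_one_eq_nil h]; rfl
  · have hN : ((N.toNat : Nat) : Int) = N := Int.toNat_of_nonneg h.le
    rw [← hN, gcc_invariant]
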